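-- pv_equiv track=rewrite | github.com/yunjinchoidev/problemSolving | 2023/January/프로그래머스/모음 사전.py | solution
-- ===== SOURCE A (Python) =====
-- def solution(word):
--     answer = 0
--     s = "AEIOU"
--     r = []
--
--     def all(cnt, start_word):
--         if cnt == 5:
--             return
--
--         for i in range(len(s)):
--             w = start_word + s[i]
--             r.append(w)
--             all(cnt + 1, w)
--
--     all(0, "")
--     answer = r.index(word) + 1
--     return answer
-- ===== SOURCE B (Python) =====
-- def solution(word):
--     place = [781, 156, 31, 6, 1]
--     answer = 0
--     for i, c in enumerate(word):
--         answer += place[i] * "AEIOU".index(c) + 1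
--     return answer
-- ===== Notes on version B (the rewrite author's own statement) =====
-- stated objective: faster
-- what changed: B computes the rank with a positional base-5 closed form (place values [781,156,31,6,1], +1 per position) instead of generating the whole 3905-word dictionary and scanning it with list.index.
-- crash fix: On the empty word A raises ValueError (not in the dictionary) while B returns 0. — e.g. on solution(""): A raises ValueError, B returns 0
import Mathlib
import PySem

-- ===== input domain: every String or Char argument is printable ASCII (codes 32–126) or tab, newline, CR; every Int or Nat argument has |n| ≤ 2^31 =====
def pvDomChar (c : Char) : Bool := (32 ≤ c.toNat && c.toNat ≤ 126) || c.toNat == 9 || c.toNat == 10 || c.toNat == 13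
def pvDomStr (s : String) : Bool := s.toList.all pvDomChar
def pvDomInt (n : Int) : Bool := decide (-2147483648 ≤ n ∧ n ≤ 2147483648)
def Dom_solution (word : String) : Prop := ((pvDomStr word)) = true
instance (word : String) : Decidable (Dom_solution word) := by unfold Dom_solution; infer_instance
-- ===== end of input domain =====

-- B replaces A's build-the-whole-dictionary-and-scan with a positional base-5 closed form (faster).

-- ===== PORT A =====
-- s = "AEIOU" (as a char list; the ports work on code points)
def pvVowels : List Char := ['A', 'E', 'I', 'O', 'U']

-- the nested 'def all(cnt, start_word)' with its append-only mutable r, ported in writer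
-- style: pvAllA n start is the list of words 'all (5-n) start' appends to r (fuel = 5 - cnt,
-- which makes the same recursion structural); each loop step emits w and then the words of
-- the recursive call, in Python's order
def pvAllA : Nat → List Char → List (List Char)
  | 0, _ => []
  | n + 1, start =>
      pvVowels.foldl (fun acc c => acc ++ ((start ++ [c]) :: pvAllA n (start ++ [c]))) []

def solution (word : String) : Int :=
  match PySem.List.index? (pvAllA 5 []) word.toList with   -- r = all(0, "") 's appends
  | some i => (i : Int) + 1
  | none => 0   -- unreachable under Pre_: Python's r.index raises ValueError here

-- ===== PORT B =====
def pvPlace : List Int := [781, 156, 31, 6, 1]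

def solution_alt (word : String) : Int :=
  (PySem.List.enumerate word.toList 0).foldl
    (fun answer ic =>
      answer + PySem.List.pyGetD pvPlace ic.1 0
                 * (((PySem.List.index? pvVowels ic.2).getD 0 : Nat) : Int) + 1) 0

-- ===== PRECONDITION & SPEC =====
-- Pre_ excludes exactly the words on which A's r.index raises ValueError: words whose
-- length is not 1..5 or containing a non-vowel character.
def Pre_solution (word : String) : Prop :=
  1 ≤ word.toList.length ∧ word.toList.length ≤ 5 ∧
    word.toList.all (fun c => pvVowels.contains c) = true
instance (word : String) : Decidable (Pre_solution word) := by unfold Pre_solution; infer_instance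

def pvWitness_solution : String := "IOU"

-- On the empty word A raises ValueError (not in the dictionary) while B returns 0.
def Raises_solution (word : String) : Prop := word.toList = []
instance (word : String) : Decidable (Raises_solution word) := by unfold Raises_solution; infer_instance
def pvRaiseWitness_solution : String := ""
def pvRaiseWitnessOut_solution : Int := 0

def Spec_solution (word : String) (out : Int) : Prop := out = solution_alt word
instance (word : String) (out : Int) : Decidable (Spec_solution word out) := by unfold Spec_solution; infer_instance

-- ===== CLAIM (what is proved, stated in full; the proofs are below) =====
def Claim_equal_solution : Prop := ∀ (word : String), Dom_solution word → Pre_solution word → Spec_solution word (solution word)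
def Claim_raises_solution : Prop := (∀ (word : String), Dom_solution word → Raises_solution word → ¬ Pre_solution word) ∧ (Dom_solution (pvRaiseWitness_solution) ∧ Raises_solution (pvRaiseWitness_solution) ∧ solution_alt (pvRaiseWitness_solution) = pvRaiseWitnessOut_solution)

-- ===== LEMMAS AND PROOFS =====

-- the pure tree of nonempty words of length ≤ n below a given prefix, in A's generation order
def pvG : Nat → List Char → List (List Char)
  | 0, _ => []
  | n + 1, start =>
      (pvVowels.map (fun c => (start ++ [c]) :: pvG n (start ++ [c]))).flatten

-- number of nonempty words of length ≤ n over 5 letters (= |pvG n start|)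
def pvL : Nat → Nat
  | 0 => 0
  | n + 1 => 5 * (1 + pvL n)

theorem pvG_length (n : Nat) (start : List Char) : (pvG n start).length = pvL n := by
  induction n generalizing start with
  | zero => simp [pvG, pvL]
  | succ n ih => simp [pvG, pvL, pvVowels, ih]; ring

theorem pvG_shape {n : Nat} {start x : List Char} (hx : x ∈ pvG n start) :
    ∃ c t, c ∈ pvVowels ∧ x = start ++ c :: t := by
  induction n generalizing start with
  | zero => simp [pvG] at hx
  | succ n ih =>
    simp only [pvG, List.mem_flatten, List.mem_map] at hx
    obtain ⟨l, ⟨c, hc, rfl⟩, hxl⟩ := hx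
    rcases List.mem_cons.mp hxl with h | h
    · exact ⟨c, [], hc, by simp [h]⟩
    · obtain ⟨c', t', _, heq⟩ := ih h
      exact ⟨c, c' :: t', hc, by simp [heq]⟩

theorem pvAllA_eq (n : Nat) (start : List Char) :
    pvAllA n start = pvG n start := by
  induction n generalizing start with
  | zero => simp [pvAllA, pvG]
  | succ n ih =>
    show pvVowels.foldl _ [] = _
    have key : ∀ (l : List Char) (acc : List (List Char)),
        l.foldl (fun acc c => acc ++ ((start ++ [c]) :: pvG n (start ++ [c]))) acc =
        acc ++ (l.map (fun c => (start ++ [c]) :: pvG n (start ++ [c]))).flatten := by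
      intro l
      induction l with
      | nil => simp
      | cons c l ihl => intro acc; simp [List.foldl_cons, ihl]
    have hfun : (fun acc c => acc ++ ((start ++ [c]) :: pvAllA n (start ++ [c]))) =
        (fun (acc : List (List Char)) c => acc ++ ((start ++ [c]) :: pvG n (start ++ [c]))) := by
      funext acc c
      rw [ih]
    rw [hfun]
    simpa [pvG] using key pvVowels []

theorem index?_append_of_not_mem {l t : List (List Char)} {v : List Char} (h : v ∉ l) :
    PySem.List.index? (l ++ t) v = (PySem.List.index? t v).map (· + l.length) := by
  induction l with
  | nil => simp
  | cons x l ihl =>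
    have hne : x ≠ v := by rintro rfl; exact h (by simp)
    have hv : v ∉ l := fun hm => h (by simp [hm])
    rw [List.cons_append, PySem.List.index?_cons_of_ne _ hne, ihl hv]
    cases PySem.List.index? t v <;> simp; omega

-- the index of start ++ cs inside pvG n start, as A's scan finds it
def pvR : Nat → List Char → Nat
  | _, [] => 0
  | n, c :: rest =>
      ((PySem.List.index? pvVowels c).getD 0) * (1 + pvL (n - 1)) +
        (if rest = [] then 0 else 1 + pvR (n - 1) rest)

theorem pvR_cons (n : Nat) (c : Char) (rest : List Char) :
    pvR n (c :: rest) =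
      ((PySem.List.index? pvVowels c).getD 0) * (1 + pvL (n - 1)) +
        (if rest = [] then 0 else 1 + pvR (n - 1) rest) := rfl

theorem pvG_index (n : Nat) (c : Char) (rest start : List Char)
    (hn : rest.length + 1 ≤ n) (hc : c ∈ pvVowels) (hrest : ∀ d ∈ rest, d ∈ pvVowels) :
    PySem.List.index? (pvG n start) (start ++ c :: rest) = some (pvR n (c :: rest)) := by
  induction n generalizing c rest start with
  | zero => omega
  | succ m ih =>
    have key : ∀ (l : List Char), c ∈ l →
        PySem.List.index? ((l.map (fun c' => (start ++ [c']) :: pvG m (start ++ [c']))).flatten)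
            (start ++ c :: rest) =
        some (((PySem.List.index? l c).getD 0) * (1 + pvL m) +
              (if rest = [] then 0 else 1 + pvR m rest)) := by
      intro l hcl
      induction l with
      | nil => simp at hcl
      | cons c' l ihl =>
        simp only [List.map_cons, List.flatten_cons, List.cons_append]
        by_cases hcc : c' = c
        · subst hcc
          cases rest with
          | nil =>
            rw [PySem.List.index?_cons_self, PySem.List.index?_cons_self]
            simp
          | cons d t =>
            have hne : start ++ [c'] ≠ start ++ c' :: d :: t := by simp
            have harr : start ++ c' :: d :: t = (start ++ [c']) ++ d :: t := by simp
            rw [PySem.List.index?_cons_of_ne _ hne]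
            have hidx := ih d t (start ++ [c']) (by simp at hn ⊢; omega)
              (hrest d (by simp)) (fun e he => hrest e (by simp [he]))
            have hmem : start ++ c' :: d :: t ∈ pvG m (start ++ [c']) := by
              rw [harr]
              exact (PySem.List.index?_isSome_iff _ _).mp (by rw [hidx]; rfl)
            rw [PySem.List.index?_append_of_mem _ hmem, harr, hidx,
              PySem.List.index?_cons_self]
            simp [Nat.add_comm]
        · have hnotmem : start ++ c :: rest ∉ (start ++ [c']) :: pvG m (start ++ [c']) := by
            intro hm
            rcases List.mem_cons.mp hm with heq | hm2
            · simp at heq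
              exact hcc heq.1.symm
            · obtain ⟨e, t', _, heq⟩ := pvG_shape hm2
              rw [List.append_assoc] at heq
              simp at heq
              exact hcc heq.1.symm
          have hclc : c ∈ l := by
            rcases List.mem_cons.mp hcl with heq | hmm
            · exact absurd heq.symm hcc
            · exact hmm
          rw [← List.cons_append, index?_append_of_not_mem hnotmem, ihl hclc]
          obtain ⟨k, hk⟩ := Option.isSome_iff_exists.mp
            ((PySem.List.index?_isSome_iff l c).mpr hclc)
          rw [PySem.List.index?_cons_of_ne _ hcc, hk]
          simp [pvG_length]
          ring
    have hkey := key pvVowels hc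
    show PySem.List.index? (pvG (m + 1) start) (start ++ c :: rest) = _
    rw [pvG, hkey, pvR_cons]
    simp

-- B's running sum, starting at position i
def pvSumB : Nat → List Char → Int
  | _, [] => 0
  | i, c :: rest =>
      PySem.List.pyGetD pvPlace (i : Int) 0
        * (((PySem.List.index? pvVowels c).getD 0 : Nat) : Int) + 1 + pvSumB (i + 1) rest

theorem pvSumB_nil (i : Nat) : pvSumB i [] = 0 := rfl

theorem pvSumB_cons (i : Nat) (c : Char) (rest : List Char) :
    pvSumB i (c :: rest) =
      PySem.List.pyGetD pvPlace (i : Int) 0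
        * (((PySem.List.index? pvVowels c).getD 0 : Nat) : Int) + 1 + pvSumB (i + 1) rest := rfl

theorem solution_alt_foldl (cs : List Char) (i : Nat) (acc : Int) :
    (PySem.List.enumerate cs (i : Int)).foldl
      (fun answer ic =>
        answer + PySem.List.pyGetD pvPlace ic.1 0
                   * (((PySem.List.index? pvVowels ic.2).getD 0 : Nat) : Int) + 1) acc
    = acc + pvSumB i cs := by
  induction cs generalizing i acc with
  | nil => simp [PySem.List.enumerate_nil, pvSumB_nil]
  | cons c cs ih =>
    rw [PySem.List.enumerate_cons]
    simp only [List.foldl_cons]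
    have hcast : ((i : Int) + 1) = ((i + 1 : Nat) : Int) := by push_cast; ring
    rw [hcast, ih, pvSumB_cons]
    ring

theorem pvPlace_fact (i n : Nat) (h : i + n = 5) (h1 : 1 ≤ n) :
    PySem.List.pyGetD pvPlace (i : Int) 0 = ((1 + pvL (n - 1) : Nat) : Int) := by
  have hn5 : n = 5 - i := by omega
  subst hn5
  have hi : i ≤ 4 := by omega
  interval_cases i <;> decide

theorem pvR_eq_pvSumB (cs : List Char) (i n : Nat) (h : i + n = 5)
    (hn : cs.length ≤ n) (hne : cs ≠ []) :
    ((pvR n cs : Nat) : Int) + 1 = pvSumB i cs := by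
  induction cs generalizing i n with
  | nil => exact absurd rfl hne
  | cons c rest ih =>
    have h1 : 1 ≤ n := by simp at hn; omega
    have hplace := pvPlace_fact i n h h1
    cases rest with
    | nil =>
      rw [pvR_cons, pvSumB_cons, pvSumB_nil, hplace]
      simp
      push_cast
      ring
    | cons d t =>
      have ihh := ih (i + 1) (n - 1) (by omega) (by simp at hn ⊢; omega) (by simp)
      rw [pvR_cons, pvSumB_cons, hplace, ← ihh]
      simp only [if_neg (by simp : ¬(d :: t) = ([] : List Char))]
      push_cast
      ring

-- ===== VERDICT (by name: the statement is the Claim_ definition above) =====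
theorem solution_spec : Claim_equal_solution := by
  intro word _ hpre
  obtain ⟨h1, h5, hall⟩ := hpre
  unfold Spec_solution
  cases hcs : word.toList with
  | nil => rw [hcs] at h1; simp at h1
  | cons c rest =>
    rw [hcs] at h5 hall
    have hall' : ∀ d ∈ c :: rest, d ∈ pvVowels := by
      intro d hd
      have := List.all_eq_true.mp hall d hd
      simpa using this
    have hidx : PySem.List.index? (pvAllA 5 []) (c :: rest) = some (pvR 5 (c :: rest)) := by
      rw [pvAllA_eq]
      have := pvG_index 5 c rest [] (by simpa using h5) (hall' c (by simp))
        (fun d hd => hall' d (by simp [hd]))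
      simpa using this
    have hA : solution word = ((pvR 5 (c :: rest) : Nat) : Int) + 1 := by
      unfold solution
      rw [hcs, hidx]
    have hB : solution_alt word = pvSumB 0 word.toList := by
      unfold solution_alt
      have := solution_alt_foldl word.toList 0 0
      simpa using this
    rw [hA, hB, hcs]
    exact pvR_eq_pvSumB (c :: rest) 0 5 (by omega) (by simpa using h5) (by simp)

theorem solution_raises : Claim_raises_solution := by
  unfold Claim_raises_solution
  exact ⟨by
    intro word _ hr hpre
    obtain ⟨hl, -, -⟩ := hpre
    have hr' : word.toList = [] := hr
    rw [hr'] at hl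
    simp at hl, by decide⟩

-- self-check: at the raise witness, the crash region holds and lies outside Pre_
theorem solution_raises_witness_ok :
    Raises_solution pvRaiseWitness_solution ∧ ¬ Pre_solution pvRaiseWitness_solution :=
  ⟨solution_raises.2.2.1,
    solution_raises.1 pvRaiseWitness_solution solution_raises.2.1 solution_raises.2.2.1⟩
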